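-- pv_equiv track=rewrite | github.com/javierchacon262/DeepFinance | preproc.py | confirm_points
-- ===== SOURCE A (Python) =====
-- def confirm_points(points, df, back):
--     confirmed = []
--     for idx, price in points:
--         # Confirmar que sea un máximo/mínimo válido mirando hacia atrás
--         valid = True
--         for j in range(1, back + 1):
--             if idx - j >= 0:
--                 if price < df[idx - j]:  # Si es un máximo
--                     valid = False
--                     break
--                 if price > df[idx - j]:  # Si es un mínimo
--                     valid = False
--                     break
--         if valid:
--             confirmed.append((idx, price))
--     return confirmed
-- ===== SOURCE B (Python) =====
-- def confirm_points(points, df, back):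
--     # run[i] = length of the maximal block of equal consecutive values of df ending at i
--     run = []
--     prev = None
--     r = 0
--     for v in df:
--         r = r + 1 if v == prev else 1
--         run.append(r)
--         prev = v
--     out = []
--     for idx, price in points:
--         m = min(back, idx)
--         if m <= 0 or (df[idx - 1] == price and run[idx - 1] >= m):
--             out.append((idx, price))
--     return out
-- ===== Notes on version B (the rewrite author's own statement) =====
-- stated objective: alternative
-- what changed: Replaces the per-point backward scan over range(1, back+1) with a single precomputed pass of consecutive-equal run lengths over df plus one constant-size check per point (df[idx-1]==price and run[idx-1]>=min(back,idx)).
import Mathlib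
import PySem

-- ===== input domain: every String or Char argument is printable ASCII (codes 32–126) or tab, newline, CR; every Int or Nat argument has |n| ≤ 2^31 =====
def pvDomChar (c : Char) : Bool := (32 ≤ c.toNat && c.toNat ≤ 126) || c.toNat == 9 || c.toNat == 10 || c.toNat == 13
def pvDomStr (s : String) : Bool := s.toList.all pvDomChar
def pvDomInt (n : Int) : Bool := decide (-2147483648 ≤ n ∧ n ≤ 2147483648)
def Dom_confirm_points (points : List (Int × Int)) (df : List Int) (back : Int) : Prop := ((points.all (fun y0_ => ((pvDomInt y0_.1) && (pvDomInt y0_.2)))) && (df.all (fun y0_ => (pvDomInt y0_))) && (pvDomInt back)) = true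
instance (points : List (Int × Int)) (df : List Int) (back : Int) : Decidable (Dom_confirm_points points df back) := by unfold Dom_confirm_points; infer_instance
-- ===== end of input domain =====

-- B replaces A's per-point backward scan by one precomputed pass of consecutive-equal
-- run lengths over df, giving a constant-size check per point.

-- ===== PORT A =====
-- inner 'for j in range(1, back+1)' loop with its two breaks; 'none' from pyGet? is
-- Python's IndexError (excluded by Pre_), the port returns false there.
def cpInner (idx price : Int) (df : List Int) : List Int → Bool
  | [] => true
  | j :: rest =>
    if 0 ≤ idx - j then
      match PySem.List.pyGet? df (idx - j) with
      | none => false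
      | some v =>
        if price < v then false
        else if price > v then false
        else cpInner idx price df rest
    else cpInner idx price df rest

def confirm_points (points : List (Int × Int)) (df : List Int) (back : Int) : List (Int × Int) :=
  points.foldl (fun confirmed p =>
    if cpInner p.1 p.2 df (PySem.List.pyRange 1 (back + 1) 1) then confirmed ++ [p]
    else confirmed) []

-- ===== PORT B =====
-- run-length pass: cpRuns df prev r transcribes Source B's first loop (state prev, r).
def cpRuns : List Int → Option Int → Int → List Int
  | [], _, _ => []
  | v :: rest, prev, r =>
    let r' := if some v = prev then r + 1 else 1
    r' :: cpRuns rest (some v) r'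

def confirm_points_alt (points : List (Int × Int)) (df : List Int) (back : Int) : List (Int × Int) :=
  let run := cpRuns df none 0
  points.foldl (fun out p =>
    if min back p.1 ≤ 0 ∨ ((PySem.List.pyGet? df (p.1 - 1)).getD 0 = p.2 ∧
                min back p.1 ≤ (PySem.List.pyGet? run (p.1 - 1)).getD 0) then out ++ [p]
    else out) []

-- ===== PRECONDITION & SPEC =====
-- Pre_ excludes exactly the inputs on which Python A raises IndexError: back ≥ 1 together
-- with some point index idx > len(df) (A evaluates df[idx-1] there; B raises there too).
def Pre_confirm_points (points : List (Int × Int)) (df : List Int) (back : Int) : Prop :=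
  back ≤ 0 ∨ ∀ p ∈ points, p.1 ≤ (df.length : Int)
instance (points : List (Int × Int)) (df : List Int) (back : Int) : Decidable (Pre_confirm_points points df back) := by unfold Pre_confirm_points; infer_instance

def pvWitness_confirm_points : (List (Int × Int)) × List Int × Int := ([(2, 5), (0, 3)], [5, 5], 2)

def Spec_confirm_points (points : List (Int × Int)) (df : List Int) (back : Int) (out : List (Int × Int)) : Prop := out = confirm_points_alt points df back
instance (points : List (Int × Int)) (df : List Int) (back : Int) (out : List (Int × Int)) : Decidable (Spec_confirm_points points df back out) := by unfold Spec_confirm_points; infer_instance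

-- ===== CLAIM (what is proved, stated in full; the proofs are below) =====
def Claim_equal_confirm_points : Prop := ∀ (points : List (Int × Int)) (df : List Int) (back : Int), Dom_confirm_points points df back → Pre_confirm_points points df back → Spec_confirm_points points df back (confirm_points points df back)

-- ===== LEMMAS AND PROOFS =====

lemma cpRuns_length (df : List Int) (prev : Option Int) (r : Int) :
    (cpRuns df prev r).length = df.length := by
  induction df generalizing prev r with
  | nil => rfl
  | cons v rest ih => simp [cpRuns, ih]

lemma cpRuns_pos (df : List Int) (prev : Option Int) (r : Int) (hr : 0 ≤ r) :
    ∀ x ∈ cpRuns df prev r, 1 ≤ x := by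
  induction df generalizing prev r with
  | nil => simp [cpRuns]
  | cons v rest ih =>
    intro x hx
    simp only [cpRuns, List.mem_cons] at hx
    rcases hx with h | h
    · subst h; split <;> omega
    · exact ih (some v) _ (by split <;> omega) x h

lemma cpRuns_snoc (ys : List Int) (v : Int) (prev : Option Int) (r : Int) :
    cpRuns (ys ++ [v]) prev r =
      cpRuns ys prev r ++
        [if some v = (match ys.getLast? with | some x => some x | none => prev) then
            (match (cpRuns ys prev r).getLast? with | some x => x | none => r) + 1
          else 1] := by
  induction ys generalizing prev r with
  | nil => simp [cpRuns]
  | cons y ys' ih =>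
    simp only [List.cons_append, cpRuns, ih]
    cases ys' with
    | nil => simp [cpRuns]
    | cons z zs =>
      simp only [cpRuns, List.getLast?_cons_cons]
      rfl

-- m ≤ run[i]  ↔  the m df-values ending at index i are all equal (for 1 ≤ m ≤ i+1)
lemma run_char (df : List Int) (i : Nat) (hi : i < df.length) (m : Nat) (hm : 1 ≤ m)
    (hmi : m ≤ i + 1) :
    ((m : Int) ≤ (cpRuns df none 0).getD i 0 ↔
      ∀ k : Nat, i < k + m → k ≤ i → df.getD k 0 = df.getD i 0) := by
  induction df using List.reverseRecOn generalizing i m with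
  | nil => simp at hi
  | append_singleton ys v ih =>
    rw [cpRuns_snoc]
    rcases lt_or_ge i ys.length with hlt | hge
    · have h1 : (cpRuns ys none 0).length = ys.length := cpRuns_length ys none 0
      rw [List.getD_append _ _ _ _ (by omega)]
      have hk : ∀ k : Nat, k ≤ i → (ys ++ [v]).getD k 0 = ys.getD k 0 := fun k hk =>
        List.getD_append _ _ _ _ (by omega)
      rw [ih i hlt m hm hmi]
      constructor
      · intro h k hk1 hk2; rw [hk k hk2, hk i (le_refl i)]; exact h k hk1 hk2
      · intro h k hk1 hk2
        have := h k hk1 hk2; rwa [hk k hk2, hk i (le_refl i)] at this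
    · have hi' : i = ys.length := by simp at hi; omega
      subst hi'
      have h1 : (cpRuns ys none 0).length = ys.length := cpRuns_length ys none 0
      rw [List.getD_append_right _ _ _ _ (by omega), h1, Nat.sub_self]
      have hvi : (ys ++ [v]).getD ys.length 0 = v := by
        rw [List.getD_append_right _ _ _ _ (le_refl _), Nat.sub_self]; rfl
      rw [hvi]
      cases hys : ys.getLast? with
      | none =>
        have hysnil : ys = [] := List.getLast?_eq_none_iff.mp hys
        subst hysnil
        norm_num at hmi
        have hm1 : m = 1 := by omega
        subst hm1
        constructor
        · intro _ k hk1 hk2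
          have hk0 : k = 0 := by simp at hk2; omega
          subst hk0; rfl
        · intro _; simp
      | some w =>
        have hysne : ys ≠ [] := by rintro rfl; simp at hys
        have hlen : 1 ≤ ys.length := by cases ys <;> simp_all
        have hwi : ys.getD (ys.length - 1) 0 = w := by
          rw [List.getLast?_eq_getElem?] at hys
          rw [List.getD_eq_getElem?_getD, hys]
          rfl
        have hwdf : (ys ++ [v]).getD (ys.length - 1) 0 = w := by
          rw [List.getD_append _ _ _ _ (by omega)]; exact hwi
        by_cases hvw : v = w
        · have hrne : (cpRuns ys none 0) ≠ [] := by
            intro hnil; rw [← h1, hnil] at hlen; simp at hlen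
          have hrl : (match (cpRuns ys none 0).getLast? with | some x => x | none => (0:Int)) =
              (cpRuns ys none 0).getD (ys.length - 1) 0 := by
            rw [List.getLast?_eq_getElem?, List.getD_eq_getElem?_getD]
            have he : ys.length - 1 = (cpRuns ys none 0).length - 1 := by omega
            rw [he]
            cases hx : (cpRuns ys none 0)[(cpRuns ys none 0).length - 1]? with
            | none =>
              rw [List.getElem?_eq_none_iff] at hx
              have : (cpRuns ys none 0).length ≠ 0 := by
                intro h0; exact hrne (List.eq_nil_of_length_eq_zero h0)
              omega
            | some x => rfl
          have hvi2 : (ys ++ [w]).getD ys.length 0 = w := hvw ▸ hvi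
          simp only [hvw, hrl]
          simp only [if_true, List.getD_cons_zero]
          rcases Nat.eq_or_lt_of_le hm with hm1 | hm2
          · have hpos : (1:Int) ≤ (cpRuns ys none 0).getD (ys.length - 1) 0 := by
              have hlt : ys.length - 1 < (cpRuns ys none 0).length := by omega
              rw [List.getD_eq_getElem _ _ hlt]
              exact cpRuns_pos ys none 0 (le_refl 0) _ (List.getElem_mem hlt)
            constructor
            · intro _ k hk1 hk2
              have hke : k = ys.length := by omega
              subst hke; exact hvi2
            · intro _; omega
          · have hih := ih (ys.length - 1) (by omega) (m - 1) (by omega) (by omega)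
            constructor
            · intro h k hk1 hk2
              rcases Nat.eq_or_lt_of_le hk2 with he | hl
              · subst he; exact hvi2
              · have hk' : k ≤ ys.length - 1 := by omega
                have hcast : (↑(m - 1) : Int) ≤ (cpRuns ys none 0).getD (ys.length - 1) 0 := by
                  omega
                have hkk := (hih.mp hcast) k (by omega) hk'
                rw [List.getD_append _ _ _ _ (by omega), hkk, hwi]
            · intro h
              have hc : (↑(m - 1) : Int) ≤ (cpRuns ys none 0).getD (ys.length - 1) 0 := by
                apply hih.mpr
                intro k hk1 hk2
                have h1' := h k (by omega) (by omega)
                rw [List.getD_append _ _ _ _ (by omega)] at h1'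
                rw [h1', hwi]
              push_cast at hc ⊢
              omega
        · have hne : ¬ (some v = some w) := by simpa using hvw
          rw [if_neg hne]
          simp only [List.getD_cons_zero]
          rcases Nat.eq_or_lt_of_le hm with hm1 | hm2
          · constructor
            · intro _ k hk1 hk2
              have hke : k = ys.length := by omega
              subst hke; exact hvi
            · intro _; omega
          · constructor
            · intro h; omega
            · intro h
              have h1' := h (ys.length - 1) (by omega) (by omega)
              rw [hwdf] at h1'
              exact absurd h1'.symm hvw

-- the inner loop returns true iff every looked-at df value equals price
lemma cpInner_iff (idx price : Int) (df : List Int) (L : List Int) :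
    cpInner idx price df L = true ↔
      ∀ j ∈ L, 0 ≤ idx - j → PySem.List.pyGet? df (idx - j) = some price := by
  induction L with
  | nil => simp [cpInner]
  | cons j rest ih =>
    simp only [cpInner]
    by_cases hj : 0 ≤ idx - j
    · simp only [if_pos hj]
      cases hv : PySem.List.pyGet? df (idx - j) with
      | none =>
        simp only [List.mem_cons]
        constructor
        · intro h; exact absurd h (by simp)
        · intro h
          have := h j (Or.inl rfl) hj
          rw [hv] at this; exact absurd this (by simp)
      | some v =>
        by_cases h1 : price < v
        · simp only [if_pos h1, List.mem_cons]
          constructor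
          · intro h; exact absurd h (by simp)
          · intro h
            have h' := h j (Or.inl rfl) hj
            rw [hv] at h'
            have : v = price := by injection h'
            omega
        · by_cases h2 : price > v
          · simp only [if_neg h1, if_pos h2, List.mem_cons]
            constructor
            · intro h; exact absurd h (by simp)
            · intro h
              have h' := h j (Or.inl rfl) hj
              rw [hv] at h'
              have : v = price := by injection h'
              omega
          · have hvp : v = price := by omega
            subst hvp
            simp only [if_neg h1, ih, List.mem_cons]
            constructor
            · intro h k hk hk2
              rcases hk with rfl | hk
              · exact hv
              · exact h k hk hk2
            · intro h k hk hk2; exact h k (Or.inr hk) hk2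
    · simp only [if_neg hj, ih, List.mem_cons]
      constructor
      · intro h k hk hk2
        rcases hk with rfl | hk
        · exact absurd hk2 hj
        · exact h k hk hk2
      · intro h k hk hk2; exact h k (Or.inr hk) hk2

-- per-point: A's inner-loop verdict equals B's constant-size check
lemma cond_iff (idx price back : Int) (df : List Int)
    (h : back ≤ 0 ∨ idx ≤ (df.length : Int)) :
    (cpInner idx price df (PySem.List.pyRange 1 (back + 1) 1) = true) ↔
      (min back idx ≤ 0 ∨ ((PySem.List.pyGet? df (idx - 1)).getD 0 = price ∧
        min back idx ≤ (PySem.List.pyGet? (cpRuns df none 0) (idx - 1)).getD 0)) := by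
  rw [cpInner_iff]
  by_cases hm : min back idx ≤ 0
  · constructor
    · intro _; exact Or.inl hm
    · intro _ j hj hj2
      rw [PySem.List.mem_pyRange_one] at hj
      omega
  · rw [not_le] at hm
    have hback : 1 ≤ back := by omega
    have hidx : 1 ≤ idx := by omega
    have hlen : idx ≤ (df.length : Int) := by
      rcases h with h | h
      · omega
      · exact h
    set i : Nat := (idx - 1).toNat with hidef
    have hil : i < df.length := by omega
    have hidx' : idx = (i : Int) + 1 := by omega
    set m : Nat := (min back idx).toNat with hmdef
    have hmint : (m : Int) = min back idx := by omega
    have hm1 : 1 ≤ m := by omega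
    have hmi : m ≤ i + 1 := by omega
    have hmb : (m : Int) ≤ back := by omega
    have hget : ∀ k : Nat, k < df.length →
        PySem.List.pyGet? df (k : Int) = some (df.getD k 0) := by
      intro k hk
      rw [PySem.List.pyGet?_natCast, List.getD_eq_getElem?_getD, List.getElem?_eq_getElem hk]
      rfl
    have hgi : PySem.List.pyGet? df (idx - 1) = some (df.getD i 0) := by
      have he : idx - 1 = (i : Int) := by omega
      rw [he, hget i hil]
    have hruni : PySem.List.pyGet? (cpRuns df none 0) (idx - 1) =
        some ((cpRuns df none 0).getD i 0) := by
      have he : idx - 1 = (i : Int) := by omega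
      rw [he, PySem.List.pyGet?_natCast, List.getD_eq_getElem?_getD,
        List.getElem?_eq_getElem (by rw [cpRuns_length]; exact hil)]
      rfl
    rw [hgi, hruni]
    simp only [Option.getD_some]
    have hrc := run_char df i hil m hm1 hmi
    rw [or_iff_right (by omega), ← hmint, hrc]
    constructor
    · intro H
      have hpi : df.getD i 0 = price := by
        have h1 := H 1 (by rw [PySem.List.mem_pyRange_one]; omega) (by omega)
        rw [hgi] at h1
        injection h1
      refine ⟨hpi, ?_⟩
      intro k hk1 hk2
      have hj := H (idx - (k : Int)) (by rw [PySem.List.mem_pyRange_one]; omega) (by omega)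
      have hik : idx - (idx - (k : Int)) = (k : Int) := by omega
      rw [hik, hget k (by omega)] at hj
      have : df.getD k 0 = price := by injection hj
      rw [this, hpi]
    · rintro ⟨hp, hr⟩ j hj hj2
      rw [PySem.List.mem_pyRange_one] at hj
      set k : Nat := (idx - j).toNat with hkdef
      have hk : (k : Int) = idx - j := by omega
      have hkl : k ≤ i := by omega
      have := hr k (by omega) hkl
      rw [← hk, hget k (by omega), this, hp]

lemma fold_eq (df : List Int) (back : Int) :
    ∀ (points acc : List (Int × Int)),
      (∀ p ∈ points, back ≤ 0 ∨ p.1 ≤ (df.length : Int)) →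
      points.foldl (fun confirmed p =>
        if cpInner p.1 p.2 df (PySem.List.pyRange 1 (back + 1) 1) then confirmed ++ [p]
        else confirmed) acc
      = points.foldl (fun out p =>
        if min back p.1 ≤ 0 ∨ ((PySem.List.pyGet? df (p.1 - 1)).getD 0 = p.2 ∧
            min back p.1 ≤ (PySem.List.pyGet? (cpRuns df none 0) (p.1 - 1)).getD 0) then out ++ [p]
        else out) acc := by
  intro points
  induction points with
  | nil => intro acc _; rfl
  | cons p rest ih =>
    intro acc h
    simp only [List.foldl_cons]
    have hiff := cond_iff p.1 p.2 back df (h p (by simp))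
    have hstep : (if cpInner p.1 p.2 df (PySem.List.pyRange 1 (back + 1) 1) then acc ++ [p] else acc)
        = (if min back p.1 ≤ 0 ∨ ((PySem.List.pyGet? df (p.1 - 1)).getD 0 = p.2 ∧
            min back p.1 ≤ (PySem.List.pyGet? (cpRuns df none 0) (p.1 - 1)).getD 0) then acc ++ [p]
          else acc) := by
      by_cases hc : cpInner p.1 p.2 df (PySem.List.pyRange 1 (back + 1) 1) = true
      · rw [if_pos hc, if_pos (hiff.mp hc)]
      · rw [if_neg (by simpa using hc), if_neg (fun hb => hc (hiff.mpr hb))]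
    rw [hstep]
    exact ih _ (fun q hq => h q (by simp [hq]))

-- ===== VERDICT (by name: the statement is the Claim_ definition above) =====
theorem confirm_points_spec : Claim_equal_confirm_points := by
  intro points df back _ hpre
  unfold Spec_confirm_points confirm_points confirm_points_alt
  exact fold_eq df back points []
    (fun p hp => hpre.elim Or.inl (fun h => Or.inr (h p hp)))
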